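-- pv_equiv track=rewrite | github.com/hiro-collab/tts-service | tts_service/core/chunking.py | _next_cut
-- ===== SOURCE A (Python) =====
-- def _next_cut(text: str, boundaries: tuple[str, ...], max_chars: int) -> int | None:
--     if not text:
--         return None
--     boundary_indexes = [text.find(boundary) for boundary in boundaries if boundary and text.find(boundary) >= 0]
--     if boundary_indexes:
--         return min(boundary_indexes) + 1
--     if len(text) >= max_chars:
--         return max_chars
--     return None
-- ===== SOURCE B (Python) =====
-- def _next_cut(text: str, boundaries: tuple[str, ...], max_chars: int) -> int | None:
--     i = 0
--     s = text
--     while s: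
--         if any(b and s.startswith(b) for b in boundaries):
--             return i + 1
--         s = s[1:]
--         i += 1
--     return max_chars if text and len(text) >= max_chars else None
-- ===== Notes on version B (the rewrite author's own statement) =====
-- stated objective: alternative
-- what changed: A runs text.find once per boundary over the whole text, collects the hit indexes in a list and returns min+1; B never computes any find: it walks the text once, peeling the suffix with a position counter, and returns at the first position where some non-empty boundary starts, with the max_chars/None tail shared by the empty-text case.
import Mathlib
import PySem

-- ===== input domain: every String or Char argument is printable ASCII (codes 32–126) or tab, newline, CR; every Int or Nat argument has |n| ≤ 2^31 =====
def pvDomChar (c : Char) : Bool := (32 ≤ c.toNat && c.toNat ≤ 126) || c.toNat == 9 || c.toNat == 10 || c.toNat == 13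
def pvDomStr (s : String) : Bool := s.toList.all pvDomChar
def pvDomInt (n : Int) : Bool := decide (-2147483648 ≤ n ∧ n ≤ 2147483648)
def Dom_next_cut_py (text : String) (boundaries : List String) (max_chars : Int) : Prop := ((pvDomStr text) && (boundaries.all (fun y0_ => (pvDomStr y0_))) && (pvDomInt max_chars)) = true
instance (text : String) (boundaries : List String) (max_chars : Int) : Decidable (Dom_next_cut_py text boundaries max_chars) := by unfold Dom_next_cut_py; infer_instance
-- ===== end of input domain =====

-- B replaces the find-per-boundary/min pass by a single suffix-peeling walk over the
-- text with a position counter, stopping at the first position where some non-empty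
-- boundary starts (objective: alternative algorithm, same result).

-- ===== PORT A =====
-- [text.find(b) for b in boundaries if b and text.find(b) >= 0] ; min(...) + 1 ; max_chars tail
def next_cut_py (text : String) (boundaries : List String) (max_chars : Int) : Option Int :=
  if text.toList = [] then none
  else
    let t := text.toList
    let idxs : List Int :=
      (boundaries.filter (fun b => !b.toList.isEmpty && decide (0 ≤ PySem.Chars.find t b.toList))).map
        (fun b => PySem.Chars.find t b.toList)
    if idxs ≠ [] then
      match PySem.List.min? idxs (fun x => x) with
      | some m => some (m + 1)
      | none => none
    else if (t.length : Int) ≥ max_chars then some max_chars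
    else none

-- ===== PORT B =====
-- any(b and s.startswith(b) for b in boundaries), ported as a recursion over boundaries
def pvAnyHit (s : List Char) (bs : List String) : Bool :=
  match bs with
  | [] => false
  | b :: rest => (!b.toList.isEmpty && PySem.Chars.startswith s b.toList) || pvAnyHit s rest

-- the while loop: i = 0; s = text; while s: … ; s = s[1:]; i += 1
def pvGo (bs : List String) (i : Nat) (s : List Char) : Option Int :=
  match s with
  | [] => none
  | _ :: rest => if pvAnyHit s bs then some ((i : Int) + 1) else pvGo bs (i + 1) rest

-- return max_chars if text and len(text) >= max_chars else None
def next_cut_py_alt (text : String) (boundaries : List String) (max_chars : Int) : Option Int :=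
  match pvGo boundaries 0 text.toList with
  | some r => some r
  | none =>
      if !text.toList.isEmpty && decide ((text.toList.length : Int) ≥ max_chars) then some max_chars
      else none

-- ===== PRECONDITION & SPEC =====
def Spec_next_cut_py (text : String) (boundaries : List String) (max_chars : Int) (out : Option Int) : Prop := out = next_cut_py_alt text boundaries max_chars
instance (text : String) (boundaries : List String) (max_chars : Int) (out : Option Int) : Decidable (Spec_next_cut_py text boundaries max_chars out) := by unfold Spec_next_cut_py; infer_instance

-- ===== CLAIM (what is proved, stated in full; the proofs are below) =====
def Claim_equal_next_cut_py : Prop := ∀ (text : String) (boundaries : List String) (max_chars : Int), Dom_next_cut_py text boundaries max_chars → Spec_next_cut_py text boundaries max_chars (next_cut_py text boundaries max_chars)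

-- ===== LEMMAS AND PROOFS =====

-- a prefix of a suffix is an infix
theorem pv_prefix_drop_infix {α : Type} {b t : List α} {i : Nat} (h : b <+: t.drop i) : b <:+: t := by
  obtain ⟨r, hr⟩ := h
  exact ⟨t.take i, r, by rw [List.append_assoc, hr, List.take_append_drop]⟩

-- pvAnyHit says: some non-empty boundary is a prefix of s
theorem pvAnyHit_iff (s : List Char) (bs : List String) :
    pvAnyHit s bs = true ↔ ∃ b ∈ bs, b.toList ≠ [] ∧ b.toList <+: s := by
  induction bs with
  | nil => simp [pvAnyHit]
  | cons b rest ih =>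
      simp only [pvAnyHit, Bool.or_eq_true, Bool.and_eq_true, Bool.not_eq_true',
        List.isEmpty_eq_false_iff, PySem.Chars.startswith_iff, ih, List.mem_cons]
      constructor
      · rintro (⟨hne, hp⟩ | ⟨b', hb', h⟩)
        · exact ⟨b, Or.inl rfl, hne, hp⟩
        · exact ⟨b', Or.inr hb', h⟩
      · rintro ⟨b', (rfl | hb'), hne, hp⟩
        · exact Or.inl ⟨hne, hp⟩
        · exact Or.inr ⟨b', hb', hne, hp⟩

-- the while loop computed as a find? over positions
theorem pvGo_eq_find (bs : List String) (i : Nat) (s : List Char) :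
    pvGo bs i s =
      ((List.range s.length).find? (fun j => pvAnyHit (s.drop j) bs)).map
        (fun j => ((i + j : Nat) : Int) + 1) := by
  induction s generalizing i with
  | nil => simp [pvGo]
  | cons c rest ih =>
      simp only [pvGo, List.length_cons, List.range_succ_eq_map]
      by_cases h0 : pvAnyHit (c :: rest) bs = true
      · simp [h0]
      · have h0' : pvAnyHit (c :: rest) bs = false := by simpa using h0
        have hcomp : ((fun j => pvAnyHit ((c :: rest).drop j) bs) ∘ Nat.succ)
            = fun j => pvAnyHit (rest.drop j) bs := by
          funext j; simp [Function.comp, List.drop_succ_cons]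
        rw [List.find?_cons, List.find?_map, hcomp, ih (i + 1)]
        cases hf : (List.range rest.length).find? (fun j => pvAnyHit (rest.drop j) bs) with
        | none => simp [h0']
        | some j =>
            simp only [Option.map_some, List.drop_zero, h0', Bool.false_eq_true, if_false,
              Option.some.injEq]
            push_cast
            ring

-- main equality, all inputs
theorem pv_main (text : String) (boundaries : List String) (max_chars : Int) :
    next_cut_py text boundaries max_chars = next_cut_py_alt text boundaries max_chars := by
  by_cases hte : text.toList = []
  · simp [next_cut_py, next_cut_py_alt, pvGo, hte]
  · set t := text.toList with ht
    set idxs : List Int :=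
      (boundaries.filter (fun b => !b.toList.isEmpty && decide (0 ≤ PySem.Chars.find t b.toList))).map
        (fun b => PySem.Chars.find t b.toList) with hidxs
    have mem_idxs : ∀ x, x ∈ idxs ↔
        ∃ b ∈ boundaries, b.toList ≠ [] ∧ 0 ≤ PySem.Chars.find t b.toList ∧ x = PySem.Chars.find t b.toList := by
      intro x
      simp only [hidxs, List.mem_map, List.mem_filter, Bool.and_eq_true, Bool.not_eq_true',
        List.isEmpty_eq_false_iff, decide_eq_true_eq]
      constructor
      · rintro ⟨b, ⟨hb, hne, hfd⟩, rfl⟩; exact ⟨b, hb, hne, hfd, rfl⟩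
      · rintro ⟨b, hb, hne, hfd, rfl⟩; exact ⟨b, ⟨hb, hne, hfd⟩, rfl⟩
    -- if the loop predicate holds at position i then some find index is in idxs and ≤ i
    have pred_to_idx : ∀ i : Nat, pvAnyHit (t.drop i) boundaries = true →
        ∃ b : List Char, (PySem.Chars.find t b ∈ idxs) ∧ (PySem.Chars.find t b).toNat ≤ i := by
      intro i hp
      obtain ⟨b0, hb0, hne, hsw⟩ := (pvAnyHit_iff _ _).1 hp
      have hinf : b0.toList <:+: t := pv_prefix_drop_infix hsw
      have hfd : 0 ≤ PySem.Chars.find t b0.toList := (PySem.Chars.find_nonneg_iff t b0.toList).2 hinf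
      refine ⟨b0.toList, (mem_idxs _).2 ⟨b0, hb0, hne, hfd, rfl⟩, ?_⟩
      by_contra hlt
      exact (PySem.Chars.find_spec hfd).2 i (by omega) hsw
    simp only [next_cut_py, next_cut_py_alt]
    rw [← ht, ← hidxs, if_neg hte, pvGo_eq_find]
    by_cases hidx : idxs = []
    · -- no boundary occurs: B's loop reaches the end of the text
      have hnone : (List.range t.length).find? (fun j => pvAnyHit (t.drop j) boundaries) = none := by
        rw [List.find?_eq_none]
        intro i _ hp
        obtain ⟨b, hb, _⟩ := pred_to_idx i hp
        rw [hidx] at hb; exact absurd hb (List.not_mem_nil)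
      rw [hnone, if_neg (by simp [hidx])]
      simp [hte]
    · -- some boundary occurs: the min find index is the first matching position
      obtain ⟨m, hm⟩ : ∃ m, PySem.List.min? idxs (fun x => x) = some m := by
        cases h : PySem.List.min? idxs (fun x => x) with
        | none => exact absurd ((PySem.List.min?_eq_none_iff idxs _).1 h) hidx
        | some m => exact ⟨m, rfl⟩
      have hmmem := PySem.List.min?_mem hm
      have hmin : ∀ y ∈ idxs, m ≤ y := PySem.List.min?_isMin hm
      obtain ⟨b, hb, hbne, hbfd, hmb⟩ := (mem_idxs m).1 hmmem
      have hm0 : 0 ≤ m := hmb ▸ hbfd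
      obtain ⟨hpref, hfirst⟩ := PySem.Chars.find_spec (hmb ▸ hbfd : 0 ≤ PySem.Chars.find t b.toList)
      rw [← hmb] at hpref hfirst
      have hlt : m.toNat < t.length := by
        by_contra hge
        have : t.drop m.toNat = [] := List.drop_eq_nil_of_le (by omega)
        rw [this, List.prefix_nil] at hpref
        exact hbne hpref
      have hsome : (List.range t.length).find? (fun j => pvAnyHit (t.drop j) boundaries) = some m.toNat := by
        rw [List.find?_eq_some_iff_getElem]
        refine ⟨?_, m.toNat, by simpa using hlt, by simp, ?_⟩
        · exact (pvAnyHit_iff _ _).2 ⟨b, hb, hbne, hpref⟩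
        · intro j hj
          simp only [List.getElem_range, Bool.not_eq_eq_eq_not, Bool.not_true]
          by_contra hcon
          have hp : pvAnyHit (t.drop j) boundaries = true := by
            cases h : pvAnyHit (t.drop j) boundaries with
            | false => exact absurd h hcon
            | true => rfl
          obtain ⟨b', hb'idx, hb'le⟩ := pred_to_idx j hp
          have := hmin _ hb'idx
          omega
      rw [hsome, if_pos (by simp [hidx]), hm]
      simp only [Option.map_some, Nat.zero_add, Int.toNat_of_nonneg hm0]

-- ===== VERDICT (by name: the statement is the Claim_ definition above) =====
theorem next_cut_py_spec : Claim_equal_next_cut_py := by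
  intro text boundaries max_chars _
  exact pv_main text boundaries max_chars
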